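-- pv_equiv track=rewrite | github.com/oadrian/nes-emulator | hw/apu/mixer.py | get_sv_array_str
-- ===== SOURCE A (Python) =====
-- def get_sv_array_str(lut):
--     space = " " * 4
--     res = "{\n" + space
--     count = 0
--     for entry in lut:
--         count += 1
--         res += "16'd%.5d, " % entry
--         if count % 8 == 0:
--             res += "\n" + space
--     res = res.strip("\n ,") + "\n" + space + "};"
--     return res
-- ===== SOURCE B (Python) =====
-- def get_sv_array_str(lut):
--     space = " " * 4
--     rows = []
--     i = 0
--     while i < len(lut):
--         rows.append("".join("16'd%.5d, " % e for e in lut[i:i+8]))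
--         i += 8
--     res = "{\n" + space + ("\n" + space).join(rows)
--     return res.strip("\n ,") + "\n" + space + "};"
-- ===== Notes on version B (the rewrite author's own statement) =====
-- stated objective: simpler
-- what changed: B partitions the LUT into explicit rows of 8 (slice-and-advance loop) and joins the formatted rows with the newline separator, replacing A's single running count%8 newline-injection accumulator.
import Mathlib
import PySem

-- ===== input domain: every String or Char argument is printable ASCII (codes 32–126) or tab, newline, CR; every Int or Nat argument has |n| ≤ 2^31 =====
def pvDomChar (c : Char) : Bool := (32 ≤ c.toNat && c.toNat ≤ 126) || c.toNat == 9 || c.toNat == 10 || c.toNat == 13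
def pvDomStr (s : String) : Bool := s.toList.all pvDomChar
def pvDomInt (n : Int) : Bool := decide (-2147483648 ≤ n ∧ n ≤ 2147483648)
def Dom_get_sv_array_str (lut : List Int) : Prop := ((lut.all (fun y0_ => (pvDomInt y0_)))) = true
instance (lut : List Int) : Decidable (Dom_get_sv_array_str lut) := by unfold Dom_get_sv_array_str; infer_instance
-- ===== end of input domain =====

-- B chunks the list into explicit rows of 8 and joins them, instead of A's running count%8
-- newline-injecting accumulator; objective: simpler (same asymptotic cost).

-- ===== PORT A =====
-- " " * 4
def pvSpace : List Char := List.replicate 4 ' '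
-- "16'd%.5d, " % entry  (hand-written: %-formatting has no PySem primitive; exact for all ints:
-- %.5d zero-pads the digits of |entry| to 5, with '-' in front for negative entries)
def pvPad5 (ds : List Char) : List Char := List.replicate (5 - ds.length) '0' ++ ds
def pvFmtEntry (n : Int) : List Char :=
  ['1','6','\'','d'] ++
    (if n < 0 then '-' :: pvPad5 (PySem.Int.toChars (-n)) else pvPad5 (PySem.Int.toChars n)) ++
    [',',' ']
-- the body of A's for-loop, state = (res, count)
def pvStepA (st : List Char × Int) (entry : Int) : List Char × Int :=
  let count := st.2 + 1
  let res := st.1 ++ pvFmtEntry entry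
  if PySem.Int.mod count 8 = 0 then (res ++ '\n' :: pvSpace, count) else (res, count)

def get_sv_array_str (lut : List Int) : String :=
  let st := lut.foldl pvStepA ('{' :: '\n' :: pvSpace, 0)
  String.mk (PySem.Chars.stripChars st.1 ['\n', ' ', ','] ++ '\n' :: pvSpace ++ ['}', ';'])

-- ===== PORT B =====
-- the while-loop: while i < len(lut): rows.append("".join("16'd%.5d, " % e for e in lut[i:i+8])); i += 8
def pvRowsB (lut : List Int) (i : Nat) : List (List Char) :=
  if i < lut.length then
    PySem.Chars.join [] ((PySem.List.slice lut (some (i : Int)) (some ((i : Int) + 8))).map pvFmtEntry) ::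
      pvRowsB lut (i + 8)
  else []
  termination_by lut.length - i

def get_sv_array_str_alt (lut : List Int) : String :=
  let res := '{' :: '\n' :: pvSpace ++ PySem.Chars.join ('\n' :: pvSpace) (pvRowsB lut 0)
  String.mk (PySem.Chars.stripChars res ['\n', ' ', ','] ++ '\n' :: pvSpace ++ ['}', ';'])

-- ===== PRECONDITION & SPEC =====
def Spec_get_sv_array_str (lut : List Int) (out : String) : Prop := out = get_sv_array_str_alt lut
instance (lut : List Int) (out : String) : Decidable (Spec_get_sv_array_str lut out) := by unfold Spec_get_sv_array_str; infer_instance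

-- ===== CLAIM (what is proved, stated in full; the proofs are below) =====
def Claim_equal_get_sv_array_str : Prop := ∀ (lut : List Int), Dom_get_sv_array_str lut → Spec_get_sv_array_str lut (get_sv_array_str lut)

-- ===== LEMMAS AND PROOFS =====

-- the concatenation A's loop appends to the initial "{\n    ", with entry counter starting at c
def pvBody (c : Nat) (l : List Int) : List Char :=
  match l with
  | [] => []
  | x :: xs => pvFmtEntry x ++ (if (c + 1) % 8 = 0 then '\n' :: pvSpace else []) ++ pvBody (c + 1) xs

-- one formatted row
def pvRow (l : List Int) : List Char := (l.map pvFmtEntry).flatten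

-- the trailing "\n    " that A leaves (and strip removes) when the length is a positive multiple of 8
def pvTrail (l : List Int) : List Char :=
  if l = [] then [] else if l.length % 8 = 0 then '\n' :: pvSpace else []

theorem pvJoin_nil_eq_flatten (xss : List (List Char)) :
    PySem.Chars.join [] xss = xss.flatten := by
  induction xss with
  | nil => simp [PySem.Chars.join, List.intercalate]
  | cons a t ih =>
    cases t with
    | nil => simp [PySem.Chars.join, List.intercalate]
    | cons b t' =>
      simp [PySem.Chars.join, List.intercalate] at ih ⊢
      simpa using ih

theorem pvJoin_cons_cons (sep a b : List Char) (t : List (List Char)) :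
    PySem.Chars.join sep (a :: b :: t) = a ++ sep ++ PySem.Chars.join sep (b :: t) := by
  simp [PySem.Chars.join, List.intercalate]

theorem pvFoldA (l : List Int) (acc : List Char) (c : Nat) :
    l.foldl pvStepA (acc, (c : Int)) = (acc ++ pvBody c l, ((c + l.length : Nat) : Int)) := by
  induction l generalizing acc c with
  | nil => simp [pvBody]
  | cons x xs ih =>
    simp only [List.foldl_cons, pvStepA]
    have hm : PySem.Int.mod ((c : Int) + 1) 8 = ((c : Int) + 1) % 8 :=
      PySem.Int.mod_eq_emod_of_pos (by norm_num)
    have hcast : (c : Int) + 1 = ((c + 1 : Nat) : Int) := by push_cast; ring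
    by_cases h : (c + 1) % 8 = 0
    · have hcond : PySem.Int.mod ((c : Int) + 1) 8 = 0 := by rw [hm]; omega
      rw [if_pos hcond, hcast, ih]
      refine Prod.ext ?_ ?_
      · simp [pvBody, h]
      · simp; omega
    · have hcond : ¬ PySem.Int.mod ((c : Int) + 1) 8 = 0 := by rw [hm]; omega
      rw [if_neg hcond, hcast, ih]
      refine Prod.ext ?_ ?_
      · simp [pvBody, h]
      · simp; omega

theorem pvBody_small (l : List Int) (c : Nat)
    (h : ∀ i, i < l.length → (c + i + 1) % 8 ≠ 0) :
    pvBody c l = pvRow l := by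
  induction l generalizing c with
  | nil => simp [pvBody, pvRow]
  | cons x xs ih =>
    have h0 : (c + 1) % 8 ≠ 0 := by simpa using h 0 (by simp)
    have := ih (c + 1) (fun i hi => by
      have := h (i + 1) (by simpa using Nat.succ_lt_succ hi)
      omega)
    simp [pvBody, h0, this, pvRow]

theorem pvBody_eight (c : Nat) (hc : c % 8 = 0) (l : List Int) (h : 8 ≤ l.length) :
    pvBody c l = pvRow (l.take 8) ++ '\n' :: pvSpace ++ pvBody (c + 8) (l.drop 8) := by
  match l with
  | x0 :: x1 :: x2 :: x3 :: x4 :: x5 :: x6 :: x7 :: rest =>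
    have h1 : (c + 1) % 8 ≠ 0 := by omega
    have h2 : (c + 1 + 1) % 8 ≠ 0 := by omega
    have h3 : (c + 1 + 1 + 1) % 8 ≠ 0 := by omega
    have h4 : (c + 1 + 1 + 1 + 1) % 8 ≠ 0 := by omega
    have h5 : (c + 1 + 1 + 1 + 1 + 1) % 8 ≠ 0 := by omega
    have h6 : (c + 1 + 1 + 1 + 1 + 1 + 1) % 8 ≠ 0 := by omega
    have h7 : (c + 1 + 1 + 1 + 1 + 1 + 1 + 1) % 8 ≠ 0 := by omega
    have h8 : (c + 1 + 1 + 1 + 1 + 1 + 1 + 1 + 1) % 8 = 0 := by omega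
    have hc8 : c + 1 + 1 + 1 + 1 + 1 + 1 + 1 + 1 = c + 8 := by omega
    simp [pvBody, h1, h2, h3, h4, h5, h6, h7, h8, hc8, pvRow]
  | [] => simp at h
  | [x0] => simp at h
  | [x0, x1] => simp at h
  | [x0, x1, x2] => simp at h
  | [x0, x1, x2, x3] => simp at h
  | [x0, x1, x2, x3, x4] => simp at h
  | [x0, x1, x2, x3, x4, x5] => simp at h
  | [x0, x1, x2, x3, x4, x5, x6] => simp at h

-- the row list as structural recursion on the list (proof-side view of B's while-loop)
def pvChunks (l : List Int) : List (List Char) :=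
  if l = [] then [] else pvRow (l.take 8) :: pvChunks (l.drop 8)
  termination_by l.length
  decreasing_by
    have : l.length ≠ 0 := by simpa [List.length_eq_zero_iff] using ‹¬ l = []›
    simp only [List.length_drop]
    omega

theorem pvRowsB_eq_chunks (lut : List Int) (i : Nat) :
    pvRowsB lut i = pvChunks (lut.drop i) := by
  rw [pvRowsB, pvChunks]
  by_cases h : i < lut.length
  · rw [if_pos h, if_neg (by simp [List.drop_eq_nil_iff]; omega)]
    have hslice : PySem.List.slice lut (some (i : Int)) (some ((i : Int) + 8)) =
        (lut.drop i).take 8 := by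
      have := PySem.List.slice_natCast_add (xs := lut) (j := i) (n := 8)
      simpa using this
    rw [hslice, pvJoin_nil_eq_flatten, pvRowsB_eq_chunks lut (i + 8)]
    have : lut.drop (i + 8) = (lut.drop i).drop 8 := by
      rw [List.drop_drop]
    rw [this]
    rfl
  · rw [if_neg h, if_pos (by simp [List.drop_eq_nil_iff]; omega)]
  termination_by lut.length - i

theorem pvBody_eq_join (l : List Int) (c : Nat) (hc : c % 8 = 0) :
    pvBody c l = PySem.Chars.join ('\n' :: pvSpace) (pvChunks l) ++ pvTrail l := by
  by_cases hnil : l = []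
  · subst hnil
    simp [pvBody, pvTrail, pvChunks, PySem.Chars.join, List.intercalate]
  by_cases hlen : l.length < 8
  · have hb : pvBody c l = pvRow l := by
      apply pvBody_small
      intro i hi
      omega
    have hmod : ¬ l.length % 8 = 0 := by
      have : 0 < l.length := List.length_pos_iff.mpr hnil
      omega
    have hdrop : l.drop 8 = [] := by
      simp [List.drop_eq_nil_iff]
      omega
    have htake : l.take 8 = l := List.take_of_length_le (by omega)
    rw [hb, pvChunks, if_neg hnil, hdrop, pvChunks, if_pos rfl]
    simp [pvTrail, hnil, hmod, htake, PySem.Chars.join, List.intercalate]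
  · have h8 : 8 ≤ l.length := by omega
    rw [pvBody_eight c hc l h8, pvChunks, if_neg hnil]
    by_cases hd : l.drop 8 = []
    · have hlen8 : l.length = 8 := by
        have := (List.drop_eq_nil_iff).mp hd
        omega
      rw [hd, pvChunks, if_pos rfl]
      simp [pvBody, pvTrail, hnil, hlen8, PySem.Chars.join, List.intercalate]
    · have ih := pvBody_eq_join (l.drop 8) (c + 8) (by omega)
      rw [ih]
      have hrows : pvChunks (l.drop 8) ≠ [] := by
        rw [pvChunks, if_neg hd]; simp
      obtain ⟨r, rs, hr⟩ := List.exists_cons_of_ne_nil hrows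
      rw [hr, pvJoin_cons_cons]
      have htr : pvTrail l = pvTrail (l.drop 8) := by
        have hld : (l.drop 8).length = l.length - 8 := by simp
        simp only [pvTrail, if_neg hnil, if_neg hd, hld]
        have : (l.length - 8) % 8 = l.length % 8 := by omega
        rw [this]
      rw [htr]
      simp
  termination_by l.length
  decreasing_by simp [List.length_drop]; omega

theorem pvStripChars_append (s t chars : List Char) (h : ∀ c ∈ t, chars.contains c) :
    PySem.Chars.stripChars (s ++ t) chars = PySem.Chars.stripChars s chars := by
  have hdef : ∀ (u : List Char), PySem.Chars.stripChars u chars =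
      (List.dropWhile (fun c => chars.contains c)
        ((List.dropWhile (fun c => chars.contains c) u).reverse)).reverse := fun u => rfl
  rw [hdef, hdef]
  set p := fun c : Char => chars.contains c with hp
  have ht : t.dropWhile p = [] := List.dropWhile_eq_nil_iff.mpr (fun c hc => h c hc)
  have htr : t.reverse.dropWhile p = [] :=
    List.dropWhile_eq_nil_iff.mpr (fun c hc => h c (List.mem_reverse.mp hc))
  rw [List.dropWhile_append]
  by_cases hs : (s.dropWhile p).isEmpty
  · rw [if_pos hs, ht]
    have h0 : s.dropWhile p = [] := by simpa [List.isEmpty_iff] using hs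
    simp [h0]
  · rw [if_neg hs, List.reverse_append, List.dropWhile_append, htr]
    simp

theorem get_sv_array_str_eq (lut : List Int) :
    get_sv_array_str lut = get_sv_array_str_alt lut := by
  show String.mk (PySem.Chars.stripChars
        (lut.foldl pvStepA ('{' :: '\n' :: pvSpace, 0)).1 ['\n', ' ', ','] ++ '\n' :: pvSpace ++ ['}', ';'])
    = String.mk (PySem.Chars.stripChars
        ('{' :: '\n' :: pvSpace ++ PySem.Chars.join ('\n' :: pvSpace) (pvRowsB lut 0)) ['\n', ' ', ','] ++ '\n' :: pvSpace ++ ['}', ';'])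
  have hrows : pvRowsB lut 0 = pvChunks lut := by
    simpa using pvRowsB_eq_chunks lut 0
  rw [hrows]
  have hfold : lut.foldl pvStepA ('{' :: '\n' :: pvSpace, (0 : Int)) =
      ('{' :: '\n' :: pvSpace ++ pvBody 0 lut, (lut.length : Int)) := by
    simpa using pvFoldA lut ('{' :: '\n' :: pvSpace) 0
  rw [hfold]
  congr 1
  rw [pvBody_eq_join lut 0 rfl]
  have hcons : '{' :: '\n' :: pvSpace ++
      (PySem.Chars.join ('\n' :: pvSpace) (pvChunks lut) ++ pvTrail lut) =
      ('{' :: '\n' :: pvSpace ++ PySem.Chars.join ('\n' :: pvSpace) (pvChunks lut)) ++ pvTrail lut := by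
    simp
  rw [hcons, pvStripChars_append]
  intro c hc
  simp only [pvTrail] at hc
  split at hc <;> [simp at hc; skip]
  split at hc <;> [skip; simp at hc]
  simp [pvSpace] at hc
  rcases hc with h | h <;> simp [h]

-- ===== VERDICT (by name: the statement is the Claim_ definition above) =====
theorem get_sv_array_str_spec : Claim_equal_get_sv_array_str := by
  intro lut _
  unfold Spec_get_sv_array_str
  exact get_sv_array_str_eq lut
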